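-- pv_equiv track=rewrite | github.com/jinjineer0426/BookSummarySystem | cloud_function/services/analysis_service.py | _find_hierarchy_candidates
-- ===== SOURCE A (Python) =====
-- from collections import defaultdict
-- from typing import Dict, List, Any
--
-- def _find_hierarchy_candidates(concepts: Dict[str, set]) -> Dict[str, List[str]]:
--     """Finds concepts that are substrings of others (potential parent-child)."""
--     candidates = defaultdict(list)
--     concept_list = sorted(list(concepts.keys()), key=len)  # Sort by length
--
--     for i, parent in enumerate(concept_list):
--         for child in concept_list[i+1:]:
--             # Check strict substring (and strictly longer)
--             if parent in child and len(child) > len(parent):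
--                 # Exclude if it's just a plural or minor variation (simple heuristic)
--                 if child == parent + "s" or child == parent + "es":
--                     continue
--                 candidates[parent].append(child)
--
--     return dict(candidates)
-- ===== SOURCE B (Python) =====
-- def _find_hierarchy_candidates(concepts):
--     """Inverted search: instead of testing every (parent, child) pair, each
--     child enumerates its own proper substrings once and looks them up in a
--     hash set of the concept keys."""
--     keys = sorted(concepts, key=len)
--     keyset = set(keys)
--     children = {p: [] for p in keys}
--     for c in keys:
--         L = len(c)
--         subs = set()
--         for i in range(L + 1):
--             for j in range(i, L + 1):
--                 if j - i < L:
--                     subs.add(c[i:j])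
--         for p in subs:
--             if p in keyset and c != p + "s" and c != p + "es":
--                 children[p].append(c)
--     return {p: cs for p, cs in children.items() if cs}
-- ===== Notes on version B (the rewrite author's own statement) =====
-- stated objective: faster
-- what changed: B inverts the search: instead of A's pairwise scan testing every shorter key against every longer key, each key enumerates the set of its own proper substrings once and looks them up in a hash set of all keys, appending itself to the matching parents' lists in a pre-built dict.
import Mathlib
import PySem

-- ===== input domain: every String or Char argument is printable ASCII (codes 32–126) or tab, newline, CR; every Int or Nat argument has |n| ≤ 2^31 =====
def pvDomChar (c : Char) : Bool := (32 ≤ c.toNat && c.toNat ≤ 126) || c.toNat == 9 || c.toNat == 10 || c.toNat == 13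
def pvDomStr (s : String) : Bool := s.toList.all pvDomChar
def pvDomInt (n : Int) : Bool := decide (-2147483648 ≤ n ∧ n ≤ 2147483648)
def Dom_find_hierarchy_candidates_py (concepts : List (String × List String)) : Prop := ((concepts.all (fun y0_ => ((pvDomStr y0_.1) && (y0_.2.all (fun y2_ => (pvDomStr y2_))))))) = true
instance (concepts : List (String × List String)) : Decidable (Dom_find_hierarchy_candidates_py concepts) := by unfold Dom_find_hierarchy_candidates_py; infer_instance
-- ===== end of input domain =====

-- B inverts A's pairwise scan: each key enumerates its own proper substrings once and
-- looks them up in a set of all keys (objective: faster, measured on large inputs).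


-- ===== PORT A =====
-- inner loop body: one `child` step of `for child in concept_list[i+1:]: …`
def pvInnerA (parent : String) (cand : PySem.Dict String (List String)) (child : String) :
    PySem.Dict String (List String) :=
  if PySem.Str.isIn parent child = true ∧ PySem.Str.len parent < PySem.Str.len child then
    if child = parent ++ "s" ∨ child = parent ++ "es" then cand
    else cand.insert parent (cand.getD parent [] ++ [child])
  else cand

-- outer loop body: one `(i, parent)` step of `for i, parent in enumerate(concept_list)`
def pvOuterA (concept_list : List String) (cand : PySem.Dict String (List String))
    (ip : Int × String) : PySem.Dict String (List String) :=
  (PySem.List.slice concept_list (some (ip.1 + 1)) none).foldl (pvInnerA ip.2) cand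

def find_hierarchy_candidates_py (concepts : List (String × List String)) :
    List (String × List String) :=
  let concept_list :=
    PySem.List.sorted (PySem.Dict.ofList concepts).keys (fun s => PySem.Str.len s) false
  ((PySem.List.enumerate concept_list 0).foldl (pvOuterA concept_list) PySem.Dict.empty).items

-- ===== PORT B =====
-- `subs = set()`; `for i in range(L+1): for j in range(i, L+1): if j-i < L: subs.add(c[i:j])`
def pvSubsB (c : String) : PySem.Set String :=
  let L := PySem.Str.len c
  (PySem.List.pyRange 0 (L + 1)).foldl (fun subs i =>
    (PySem.List.pyRange i (L + 1)).foldl (fun subs j =>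
      if j - i < L then PySem.Set.add subs (PySem.Str.slice c (some i) (some j)) else subs)
      subs)
    PySem.Set.empty

-- `p in keyset and c != p + "s" and c != p + "es"`
def pvGuard (keyset : PySem.Set String) (c p : String) : Bool :=
  PySem.Set.contains keyset p && !(c == p ++ "s") && !(c == p ++ "es")

-- one `c` step: enumerate c's proper substrings, append c to each matching parent's list
def pvChildStep (keyset : PySem.Set String) (d : PySem.Dict String (List String)) (c : String) :
    PySem.Dict String (List String) :=
  (pvSubsB c).foldl (fun d p =>
    if pvGuard keyset c p then d.modify p [] (fun l => l ++ [c]) else d) d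

def find_hierarchy_candidates_py_alt (concepts : List (String × List String)) :
    List (String × List String) :=
  let keys := PySem.List.sorted (PySem.Dict.ofList concepts).keys (fun s => PySem.Str.len s) false
  let keyset := PySem.Set.ofList keys
  let children0 := keys.foldl (fun d p => d.insert p ([] : List String)) PySem.Dict.empty
  let children := keys.foldl (pvChildStep keyset) children0
  children.items.filter (fun pc => !pc.2.isEmpty)

-- ===== PRECONDITION & SPEC =====
def Spec_find_hierarchy_candidates_py (concepts : List (String × List String)) (out : List (String × List String)) : Prop := out = find_hierarchy_candidates_py_alt concepts
instance (concepts : List (String × List String)) (out : List (String × List String)) : Decidable (Spec_find_hierarchy_candidates_py concepts out) := by unfold Spec_find_hierarchy_candidates_py; infer_instance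

-- ===== CLAIM (what is proved, stated in full; the proofs are below) =====
def Claim_equal_find_hierarchy_candidates_py : Prop := ∀ (concepts : List (String × List String)), Dom_find_hierarchy_candidates_py concepts → Spec_find_hierarchy_candidates_py concepts (find_hierarchy_candidates_py concepts)

-- ===== LEMMAS AND PROOFS =====

-- the canonical "p is a hierarchy child of c" predicate both proofs reduce to
def pvIsChild (parent child : String) : Bool :=
  decide (PySem.Str.len parent < PySem.Str.len child) && PySem.Str.isIn parent child
    && !(child == parent ++ "s") && !(child == parent ++ "es")

-- ----- A-side: A's nested loops compute the canonical map-filter form -----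

theorem pvInnerA_eq (p : String) (cand : PySem.Dict String (List String)) (c : String) :
    pvInnerA p cand c =
      if pvIsChild p c then cand.insert p (cand.getD p [] ++ [c]) else cand := by
  simp only [pvInnerA, pvIsChild]
  split_ifs with h1 h2 h3 h4 h5 <;> try rfl
  all_goals
    exfalso
    simp only [Bool.and_eq_true, decide_eq_true_eq, beq_eq_false_iff_ne, ne_eq,
      Bool.not_eq_eq_eq_not, Bool.not_true] at *
    tauto

theorem pvInner_fold (p : String) (xs : List String) (d : PySem.Dict String (List String)) :
    xs.foldl (pvInnerA p) d =
      (if (xs.filter (fun c => pvIsChild p c)).isEmpty then d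
       else d.insert p (d.getD p [] ++ xs.filter (fun c => pvIsChild p c))) := by
  induction xs generalizing d with
  | nil => simp
  | cons c rest ih =>
    by_cases h : pvIsChild p c = true
    · simp only [List.foldl_cons, pvInnerA_eq, h, if_pos, List.filter_cons_of_pos h,
        List.isEmpty_cons, ih]
      by_cases h2 : (rest.filter (fun c => pvIsChild p c)).isEmpty
      · rw [List.isEmpty_iff] at h2
        simp [h2]
      · simp [h2, PySem.Dict.getD_insert_self, PySem.Dict.insert_insert_self]
    · simp only [List.foldl_cons, pvInnerA_eq, h, if_neg, Bool.false_eq_true,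
        not_false_eq_true, List.filter_cons_of_neg h, ih]

-- children of K[s] never sit at index ≤ s of the length-sorted list
theorem pvFilter_drop (K : List String)
    (hpw : K.Pairwise (fun a b => PySem.Str.len a ≤ PySem.Str.len b))
    (s : Nat) (p : String) (rest : List String) (hd : K.drop s = p :: rest) :
    (K.drop (s + 1)).filter (fun c => pvIsChild p c) =
      K.filter (fun c => pvIsChild p c) := by
  have hslt : s < K.length := by
    by_contra hcon
    simp [List.drop_eq_nil_of_le (le_of_not_gt hcon)] at hd
  have hs : K[s] = p := by
    have h0 : (K.drop s)[0]'(by simp [hd]) = p := by simp [hd]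
    rwa [List.getElem_drop] at h0
  have hlen : ∀ c ∈ K.take (s + 1), PySem.Str.len c ≤ PySem.Str.len p := by
    intro c hc
    obtain ⟨j, hj, hcj⟩ := List.getElem_of_mem hc
    rw [List.length_take] at hj
    obtain ⟨hj1, hj2⟩ := Nat.lt_min.mp hj
    rw [List.getElem_take] at hcj
    rcases Nat.lt_succ_iff_lt_or_eq.mp hj1 with hlt | heq
    · have hle := List.pairwise_iff_getElem.mp hpw j s hj2 hslt hlt
      rw [hcj, hs] at hle
      exact hle
    · subst heq
      rw [hcj] at hs
      rw [hs]
  have hnil : (K.take (s + 1)).filter (fun c => pvIsChild p c) = [] := by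
    rw [List.filter_eq_nil_iff]
    intro c hc hcontra
    simp only [pvIsChild, Bool.and_eq_true, decide_eq_true_eq] at hcontra
    exact absurd hcontra.1.1.1 (not_lt.mpr (hlen c hc))
  conv_rhs => rw [← List.take_append_drop (s + 1) K, List.filter_append, hnil,
    List.nil_append]

theorem pvOuter_go (K : List String)
    (hpw : K.Pairwise (fun a b => PySem.Str.len a ≤ PySem.Str.len b)) (hnd : K.Nodup) :
    ∀ (rest : List String) (s : Nat) (d : PySem.Dict String (List String)),
      K.drop s = rest → (∀ q ∈ rest, d.contains q = false) →
      ((PySem.List.enumerate rest (s : Int)).foldl (pvOuterA K) d).items =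
        d.items ++ rest.filterMap (fun p =>
          if (K.filter (fun c => pvIsChild p c)).isEmpty then none
          else some (p, K.filter (fun c => pvIsChild p c))) := by
  intro rest
  induction rest with
  | nil => intro s d _ _; simp [PySem.List.enumerate]
  | cons p rest' ih =>
    intro s d hd hcont
    have hdrop1 : K.drop (s + 1) = rest' := by
      have := congrArg List.tail hd
      simpa using this
    have hcp : d.contains p = false := hcont p (by simp)
    have hcast : (s : Int) + 1 = ((s + 1 : Nat) : Int) := by push_cast; ring
    have hstep : pvOuterA K d ((s : Int), p) =
        (if (K.filter (fun c => pvIsChild p c)).isEmpty then d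
         else d.insert p (K.filter (fun c => pvIsChild p c))) := by
      unfold pvOuterA
      rw [hcast, PySem.List.slice_from_natCast, hdrop1, pvInner_fold,
        show rest'.filter (fun c => pvIsChild p c) = K.filter (fun c => pvIsChild p c) from by
          rw [← hdrop1]; exact pvFilter_drop K hpw s p rest' hd,
        PySem.Dict.getD_of_not_contains d [] hcp]
      simp
    rw [PySem.List.enumerate_cons, List.foldl_cons, hstep]
    by_cases hE : (K.filter (fun c => pvIsChild p c)).isEmpty
    · rw [if_pos hE, hcast, ih (s + 1) d hdrop1
        (fun q hq => hcont q (List.mem_cons_of_mem _ hq))]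
      rw [List.filterMap_cons, if_pos hE]
    · have hnds : (p :: rest').Nodup := by
        rw [← hd]; exact (List.drop_sublist s K).nodup hnd
      have hpnot : p ∉ rest' := (List.nodup_cons.mp hnds).1
      rw [if_neg hE, hcast, ih (s + 1) (d.insert p (K.filter (fun c => pvIsChild p c))) hdrop1
        (by
          intro q hq
          rw [PySem.Dict.contains_insert]
          have hqp : q ≠ p := fun h => hpnot (h ▸ hq)
          simp [hqp, hcont q (List.mem_cons_of_mem _ hq)]),
        PySem.Dict.items_insert_of_not_contains d _ hcp]
      rw [List.filterMap_cons, if_neg hE]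
      simp [List.append_assoc]

theorem pvMapFilter (l : List String) (g : String → List String) :
    (l.map (fun p => (p, g p))).filter (fun pc => !pc.2.isEmpty) =
      l.filterMap (fun p => if (g p).isEmpty then none else some (p, g p)) := by
  induction l with
  | nil => simp
  | cons a t ih =>
    by_cases h : (g a).isEmpty = true
    · rw [List.map_cons, List.filter_cons_of_neg (by simp [h]), List.filterMap_cons, if_pos h, ih]
    · rw [List.map_cons, List.filter_cons_of_pos (by simp [h]), List.filterMap_cons, if_neg h, ih]

-- the whole of A on an arbitrary length-sorted, duplicate-free key list
theorem pvMain (K : List String)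
    (hpw : K.Pairwise (fun a b => PySem.Str.len a ≤ PySem.Str.len b)) (hnd : K.Nodup) :
    ((PySem.List.enumerate K 0).foldl (pvOuterA K) PySem.Dict.empty).items =
      (K.map (fun p => (p, K.filter (fun c => pvIsChild p c)))).filter
        (fun pc => !pc.2.isEmpty) := by
  have h := pvOuter_go K hpw hnd K 0 PySem.Dict.empty (by simp)
    (fun q _ => PySem.Dict.contains_empty q)
  simp only [Nat.cast_zero] at h
  rw [h, pvMapFilter]
  simp [PySem.Dict.empty]

-- ----- B-side: the inverted substring search computes the same map-filter form -----

-- membership in a fold that conditionally adds to a set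
theorem pvMemFoldl {β : Type} (l : List β) (step : PySem.Set String → β → PySem.Set String)
    (Q : β → String → Prop) (h : ∀ s x y, y ∈ step s x ↔ y ∈ s ∨ Q x y)
    (s0 : PySem.Set String) (y : String) :
    y ∈ l.foldl step s0 ↔ y ∈ s0 ∨ ∃ x ∈ l, Q x y := by
  induction l generalizing s0 with
  | nil => simp
  | cons a t ih =>
    rw [List.foldl_cons, ih]
    simp only [List.mem_cons, h]
    constructor
    · rintro ((hy | hq) | ⟨x, hx, hq⟩)
      · exact Or.inl hy
      · exact Or.inr ⟨a, Or.inl rfl, hq⟩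
      · exact Or.inr ⟨x, Or.inr hx, hq⟩
    · rintro (hy | ⟨x, (rfl | hx), hq⟩)
      · exact Or.inl (Or.inl hy)
      · exact Or.inl (Or.inr hq)
      · exact Or.inr ⟨x, hx, hq⟩

-- a fold whose step preserves Nodup preserves Nodup
theorem pvNodupFoldl {β : Type} (l : List β) (step : PySem.Set String → β → PySem.Set String)
    (h : ∀ s x, s.Nodup → (step s x).Nodup) (s0 : PySem.Set String) (hs : s0.Nodup) :
    (l.foldl step s0).Nodup := by
  induction l generalizing s0 with
  | nil => exact hs
  | cons a t ih => exact ih _ (h _ _ hs)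

theorem pvNodup_pvSubsB (c : String) : (pvSubsB c).Nodup := by
  unfold pvSubsB
  apply pvNodupFoldl
  · intro s i hs
    apply pvNodupFoldl
    · intro s' j hs'
      split_ifs
      · exact PySem.Set.nodup_add _ _ hs'
      · exact hs'
    · exact hs
  · exact List.nodup_nil

theorem pvSubsB_mem (c y : String) :
    y ∈ pvSubsB c ↔
      PySem.Str.isIn y c = true ∧ PySem.Str.len y < PySem.Str.len c := by
  unfold pvSubsB
  rw [pvMemFoldl _ _
      (fun i y => ∃ j ∈ PySem.List.pyRange i (PySem.Str.len c + 1), j - i < PySem.Str.len c ∧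
        y = PySem.Str.slice c (some i) (some j))
      (by
        intro s i y
        rw [pvMemFoldl _ _
            (fun j y => j - i < PySem.Str.len c ∧ y = PySem.Str.slice c (some i) (some j))
            (by
              intro s' j y
              split_ifs with hij
              · rw [PySem.Set.mem_add]
                constructor
                · rintro (hy | rfl)
                  · exact Or.inl hy
                  · exact Or.inr ⟨hij, rfl⟩
                · rintro (hy | ⟨_, rfl⟩)
                  · exact Or.inl hy
                  · exact Or.inr rfl
              · constructor
                · exact Or.inl
                · rintro (hy | ⟨hij', rfl⟩)
                  · exact hy
                  · exact absurd hij' hij)])]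
  simp only [PySem.Set.empty, List.not_mem_nil, false_or]
  rw [PySem.Str.isIn_iff_infix, PySem.Str.len_eq, PySem.Str.len_eq]
  constructor
  · rintro ⟨i, hi, j, hj, hij, rfl⟩
    rw [PySem.List.mem_pyRange_one] at hi hj
    have h0i : 0 ≤ i := hi.1
    have h0j : 0 ≤ j := le_trans h0i hj.1
    have hjL : j ≤ (c.toList.length : Int) := by omega
    have htl : (PySem.Str.slice c (some i) (some j)).toList =
        (c.toList.drop i.toNat).take (j.toNat - i.toNat) := by
      simp [PySem.Str.slice, PySem.List.slice_toNat _ h0i h0j]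
    constructor
    · rw [htl]
      exact ((List.take_prefix _ _).isInfix.trans (List.drop_suffix _ _).isInfix)
    · rw [htl, List.length_take, List.length_drop]
      push_cast
      omega
  · rintro ⟨⟨m, n, hmn⟩, hlen⟩
    refine ⟨(m.length : Int), ?_, ((m.length + y.toList.length : Nat) : Int), ?_, ?_, ?_⟩
    · rw [PySem.List.mem_pyRange_one]
      have : m.length + y.toList.length + n.length = c.toList.length := by
        rw [← hmn, List.length_append, List.length_append]
      omega
    · rw [PySem.List.mem_pyRange_one]
      have : m.length + y.toList.length + n.length = c.toList.length := by
        rw [← hmn, List.length_append, List.length_append]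
      push_cast
      omega
    · push_cast
      omega
    · apply String.toList_inj.mp
      rw [show (((m.length + y.toList.length : Nat) : Int)) = ((m.length : Nat) : Int) + ((y.toList.length : Nat) : Int) by push_cast; ring]
      simp only [PySem.Str.slice]
      rw [String.toList_ofList]
      show y.toList = PySem.List.slice c.toList (some ((m.length : Nat) : Int)) _
      rw [PySem.List.slice_natCast_add, ← hmn, List.append_assoc, List.drop_left, List.take_left]

-- items shape through the inner fold over c's substring set
theorem pvInnerB (K : List String) (hK : K.Nodup) (c : String) (S : List String) (hS : S.Nodup) :
    ∀ (h : String → List String) (d : PySem.Dict String (List String)),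
      d.items = K.map (fun p => (p, h p)) →
      (S.foldl (fun d p =>
          if pvGuard (PySem.Set.ofList K) c p then d.modify p [] (fun l => l ++ [c]) else d)
        d).items =
        K.map (fun p =>
          (p, h p ++ if p ∈ S ∧ pvGuard (PySem.Set.ofList K) c p = true then [c] else [])) := by
  induction S with
  | nil =>
    intro h d hd
    rw [List.foldl_nil, hd]
    apply List.map_congr_left
    intro p _
    simp
  | cons p0 S' ih =>
    intro h d hd
    have hS' : S'.Nodup := (List.nodup_cons.mp hS).2
    have hp0 : p0 ∉ S' := (List.nodup_cons.mp hS).1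
    have hkeys : d.keys = K := by
      show d.items.map (·.1) = K
      rw [hd, List.map_map, show ((·.1) ∘ fun p => (p, h p)) = (id : String → String) from rfl,
        List.map_id]
    rw [List.foldl_cons]
    by_cases hg : pvGuard (PySem.Set.ofList K) c p0 = true
    · have hp0K : p0 ∈ K := by
        have := hg
        unfold pvGuard at this
        simp only [Bool.and_eq_true] at this
        have := (PySem.Set.contains_iff _ _).mp this.1.1
        rwa [PySem.Set.mem_ofList] at this
      have hmem : (p0, h p0) ∈ d.items := by
        rw [hd]; exact List.mem_map_of_mem hp0K
      have hget : d.getD p0 [] = h p0 :=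
        PySem.Dict.getD_of_mem_items d hmem (by rw [hkeys]; exact hK) []
      have hcont : d.contains p0 = true := by
        rw [PySem.Dict.contains_eq_decide_mem_keys, hkeys]
        simpa using hp0K
      have hmod : (d.modify p0 [] (fun l => l ++ [c])).items =
          K.map (fun p => (p, if p = p0 then h p0 ++ [c] else h p)) := by
        show (d.insert p0 ((d.getD p0 []) ++ [c])).items = _
        rw [hget, PySem.Dict.items_insert_of_contains d _ hcont, hd, List.map_map]
        apply List.map_congr_left
        intro p _
        by_cases hp : p = p0
        · subst hp; simp
        · simp [hp, Function.comp]
      rw [if_pos hg, ih hS' _ _ hmod]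
      apply List.map_congr_left
      intro p _
      by_cases hp : p = p0
      · subst hp
        simp [hp0, hg]
      · simp [hp, List.mem_cons]
    · rw [if_neg hg, ih hS' _ _ hd]
      apply List.map_congr_left
      intro p _
      by_cases hp : p = p0
      · subst hp
        simp [hg]
      · simp [hp, List.mem_cons]

-- the per-child condition reduces to the canonical predicate for keys of the dict
theorem pvCond_eq (K : List String) (p c : String) (hpK : p ∈ K) :
    (if p ∈ pvSubsB c ∧ pvGuard (PySem.Set.ofList K) c p = true then ([c] : List String) else []) =
      if pvIsChild p c then [c] else [] := by
  congr 1
  rw [eq_iff_iff]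
  rw [pvSubsB_mem]
  unfold pvGuard pvIsChild
  have hcont : PySem.Set.contains (PySem.Set.ofList K) p = true := by
    rw [PySem.Set.contains_iff, PySem.Set.mem_ofList]; exact hpK
  simp only [hcont, Bool.and_eq_true, decide_eq_true_eq, true_and]
  tauto

-- items shape through the outer fold over all keys
theorem pvOuterB (K : List String) (hK : K.Nodup) (cs : List String) :
    ∀ (h : String → List String) (d : PySem.Dict String (List String)),
      d.items = K.map (fun p => (p, h p)) →
      (cs.foldl (pvChildStep (PySem.Set.ofList K)) d).items =
        K.map (fun p => (p, h p ++ cs.filter (fun c => pvIsChild p c))) := by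
  induction cs with
  | nil =>
    intro h d hd
    simp [hd]
  | cons c cs' ih =>
    intro h d hd
    rw [List.foldl_cons]
    have hstep : (pvChildStep (PySem.Set.ofList K) d c).items =
        K.map (fun p => (p, h p ++ if pvIsChild p c then [c] else [])) := by
      unfold pvChildStep
      rw [pvInnerB K hK c (pvSubsB c) (pvNodup_pvSubsB c) h d hd]
      apply List.map_congr_left
      intro p hp
      rw [pvCond_eq K p c hp]
    rw [ih _ _ hstep]
    apply List.map_congr_left
    intro p _
    rw [List.filter_cons]
    by_cases hc : pvIsChild p c = true
    · simp [hc]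
    · simp [hc]

-- the whole of B on a duplicate-free key list
theorem pvMainB (K : List String) (hK : K.Nodup) :
    ((K.foldl (pvChildStep (PySem.Set.ofList K))
        (K.foldl (fun d p => d.insert p ([] : List String)) PySem.Dict.empty)).items).filter
      (fun pc => !pc.2.isEmpty) =
      (K.map (fun p => (p, K.filter (fun c => pvIsChild p c)))).filter
        (fun pc => !pc.2.isEmpty) := by
  have h0 : (K.foldl (fun d p => d.insert p ([] : List String)) PySem.Dict.empty).items =
      K.map (fun p => (p, ([] : List String))) := by
    have := PySem.Dict.items_foldl_insert_fresh K (fun p => p) (fun _ => ([] : List String))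
      PySem.Dict.empty (fun a _ => PySem.Dict.contains_empty a) (by simpa using hK)
    simpa [PySem.Dict.empty] using this
  rw [pvOuterB K hK K (fun _ => []) _ h0]
  simp

-- ===== VERDICT (by name: the statement is the Claim_ definition above) =====
theorem find_hierarchy_candidates_py_spec : Claim_equal_find_hierarchy_candidates_py := by
  intro concepts _
  show find_hierarchy_candidates_py concepts = find_hierarchy_candidates_py_alt concepts
  unfold find_hierarchy_candidates_py find_hierarchy_candidates_py_alt
  have hnd : (PySem.List.sorted (PySem.Dict.ofList concepts).keys
      (fun s => PySem.Str.len s) false).Nodup :=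
    (PySem.List.sorted_perm _ _ _).nodup_iff.mpr (PySem.Dict.nodup_keys_ofList _)
  rw [pvMain _ (PySem.List.sorted_pairwise _ _) hnd, ← pvMainB _ hnd]
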